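-- pv_equiv track=rewrite | github.com/aorursy/new-nb-5 | penakazato_quora-eda.py | Question_Word
-- ===== SOURCE A (Python) =====
-- def Question_Word(questions):
--
--     Q_words = []
--
--     for q in questions:
--
--         j = 0
--
--         if 'What' in q: j = 1
--
--         elif 'what' in q: j = 1
--
--         elif 'Which' in q: j = 2
--
--         elif 'How' in q: j = 3
--
--         elif 'Can' in q: j = 4
--
--         elif 'When' in q: j = 5
--
--         elif 'Why' in q: j = 6
--
--         elif 'Should' in q: j = 7
--
--         elif 'Does' in q: j = 8
--
--         Q_words.append(j)
--
--     return(Q_words)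
-- ===== SOURCE B (Python) =====
-- TABLE = {'What': 1, 'what': 1, 'Which': 2, 'How': 3, 'Can': 4,
--          'When': 5, 'Why': 6, 'Should': 7, 'Does': 8}
--
-- def Question_Word(questions):
--     # Collect the codes of ALL patterns contained in the question and take the
--     # minimum (0 if none). Correct because A's priority order is exactly the
--     # order of increasing code ('What'/'what' share code 1), so the highest-
--     # priority match is always the smallest matched code.
--     return [min((c for w, c in TABLE.items() if w in q), default=0)
--             for q in questions]
-- ===== Notes on version B (the rewrite author's own statement) =====
-- stated objective: alternative
-- what changed: Instead of A's ordered first-match elif ladder, B tests every pattern, collects all matching codes and returns their minimum (0 if none); this is correct because A's priority order coincides with increasing code.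
import Mathlib
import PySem

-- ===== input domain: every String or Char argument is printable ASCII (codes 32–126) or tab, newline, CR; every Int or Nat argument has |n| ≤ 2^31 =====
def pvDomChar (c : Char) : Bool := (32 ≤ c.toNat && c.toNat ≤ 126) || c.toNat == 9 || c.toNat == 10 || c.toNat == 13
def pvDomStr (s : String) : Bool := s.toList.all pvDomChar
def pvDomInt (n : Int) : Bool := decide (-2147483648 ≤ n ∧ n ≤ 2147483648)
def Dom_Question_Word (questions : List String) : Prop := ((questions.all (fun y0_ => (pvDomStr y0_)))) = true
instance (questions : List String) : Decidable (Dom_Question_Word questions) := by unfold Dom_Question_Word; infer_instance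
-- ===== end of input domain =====

-- B replaces A's ordered first-match elif ladder by "minimum of all matched codes"
-- (valid because A's priority order is exactly increasing code); objective: alternative.

-- ===== PORT A =====
def Question_Word (questions : List String) : List Int :=
  questions.foldl (fun Q_words q =>
    let j : Int :=
      if PySem.Str.isIn "What" q then 1
      else if PySem.Str.isIn "what" q then 1
      else if PySem.Str.isIn "Which" q then 2
      else if PySem.Str.isIn "How" q then 3
      else if PySem.Str.isIn "Can" q then 4
      else if PySem.Str.isIn "When" q then 5
      else if PySem.Str.isIn "Why" q then 6
      else if PySem.Str.isIn "Should" q then 7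
      else if PySem.Str.isIn "Does" q then 8
      else 0
    Q_words ++ [j]) []

-- ===== PORT B =====
def pvTable : List (String × Int) :=
  [("What", 1), ("what", 1), ("Which", 2), ("How", 3), ("Can", 4),
   ("When", 5), ("Why", 6), ("Should", 7), ("Does", 8)]

def Question_Word_alt (questions : List String) : List Int :=
  questions.map (fun q =>
    -- min(codes of all contained patterns, default=0)
    ((pvTable.filterMap (fun p => if PySem.Str.isIn p.1 q then some p.2 else none)).min?).getD 0)

-- ===== PRECONDITION & SPEC =====
def Spec_Question_Word (questions : List String) (out : List Int) : Prop := out = Question_Word_alt questions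
instance (questions : List String) (out : List Int) : Decidable (Spec_Question_Word questions out) := by unfold Spec_Question_Word; infer_instance

-- ===== CLAIM =====
def Claim_equal_Question_Word : Prop := ∀ (questions : List String), Dom_Question_Word questions → Spec_Question_Word questions (Question_Word questions)

-- ===== LEMMAS AND PROOFS =====
theorem pvBool_step (b1 b2 b3 b4 b5 b6 b7 b8 b9 : Bool) :
    (if b1 then (1:Int) else if b2 then 1 else if b3 then 2 else if b4 then 3
      else if b5 then 4 else if b6 then 5 else if b7 then 6 else if b8 then 7
      else if b9 then 8 else 0)
    = (((if b1 then [(1:Int)] else []) ++ ((if b2 then [1] else []) ++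
        ((if b3 then [2] else []) ++ ((if b4 then [3] else []) ++
        ((if b5 then [4] else []) ++ ((if b6 then [5] else []) ++
        ((if b7 then [6] else []) ++ ((if b8 then [7] else []) ++
        (if b9 then [8] else []))))))))).min?).getD 0 := by
  cases b1 <;> cases b2 <;> cases b3 <;> cases b4 <;> cases b5 <;> cases b6 <;>
    cases b7 <;> cases b8 <;> cases b9 <;> decide

theorem pvFilterMap_if {A B : Type} (c : A → Bool) (g : A → B) (l : List A) :
    l.filterMap (fun p => if c p then some (g p) else none)
      = l.flatMap (fun p => if c p then [g p] else []) := by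
  induction l with
  | nil => rfl
  | cons a t ih =>
    cases h : c a <;> simp [h, ih]

theorem pvStep_eq (q : String) :
    (if PySem.Str.isIn "What" q then (1:Int)
      else if PySem.Str.isIn "what" q then 1
      else if PySem.Str.isIn "Which" q then 2
      else if PySem.Str.isIn "How" q then 3
      else if PySem.Str.isIn "Can" q then 4
      else if PySem.Str.isIn "When" q then 5
      else if PySem.Str.isIn "Why" q then 6
      else if PySem.Str.isIn "Should" q then 7
      else if PySem.Str.isIn "Does" q then 8
      else 0)
    = ((pvTable.filterMap (fun p => if PySem.Str.isIn p.1 q then some p.2 else none)).min?).getD 0 := by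
  rw [pvFilterMap_if (fun s => PySem.Str.isIn s.1 q) (fun s => s.2) pvTable]
  simp only [pvTable, List.flatMap_cons, List.flatMap_nil, List.append_nil]
  exact pvBool_step _ _ _ _ _ _ _ _ _

theorem pvFoldl_eq_map (questions : List String) (f : String → Int) (acc : List Int) :
    questions.foldl (fun Q_words q => Q_words ++ [f q]) acc = acc ++ questions.map f := by
  induction questions generalizing acc with
  | nil => simp
  | cons h t ih => simp [List.foldl, ih]

-- ===== VERDICT =====
theorem Question_Word_spec : Claim_equal_Question_Word := by
  intro questions _
  unfold Spec_Question_Word Question_Word Question_Word_alt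
  simp only [pvStep_eq]
  exact pvFoldl_eq_map questions _ []
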